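-- pv_equiv track=rewrite | github.com/gkrankov/Git | Exercises/Find Number, Double SUM.py | solution
-- ===== SOURCE A (Python) =====
-- def solution(N):
--     def digit_sum(num):
--         return sum(map(int, str(num)))
--
--     target_sum = 2 * digit_sum(N)
--     next_number = N + 1
--
--     while True:
--         if digit_sum(next_number) == target_sum:
--             return next_number
--         next_number += 1
-- ===== SOURCE B (Python) =====
-- def solution(N):
--     # B: arithmetic digit sum (no string round-trip) and a stride-9 search:
--     # digit_sum(m) ≡ m (mod 9), so only candidates ≡ target (mod 9) can match.
--     def digit_sum(num):
--         s = 0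
--         while num > 0:
--             s += num % 10
--             num //= 10
--         return s
--
--     target = 2 * digit_sum(N)
--     m = N + 1 + (target - N - 1) % 9
--     while digit_sum(m) != target:
--         m += 9
--     return m
-- ===== Notes on version B (the rewrite author's own statement) =====
-- stated objective: alternative
-- what changed: B computes the digit sum arithmetically (divmod loop) instead of via str(), and scans only the residue class target mod 9 (stride-9 search from the aligned start point) instead of every integer, since digit_sum(m) == m (mod 9); Pre_ excludes N < 0 (A raises ValueError) and N = 0 (A never returns).
-- outside the precondition, e.g. on solution(-1): A raises ValueError, B returns 0
import Mathlib
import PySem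

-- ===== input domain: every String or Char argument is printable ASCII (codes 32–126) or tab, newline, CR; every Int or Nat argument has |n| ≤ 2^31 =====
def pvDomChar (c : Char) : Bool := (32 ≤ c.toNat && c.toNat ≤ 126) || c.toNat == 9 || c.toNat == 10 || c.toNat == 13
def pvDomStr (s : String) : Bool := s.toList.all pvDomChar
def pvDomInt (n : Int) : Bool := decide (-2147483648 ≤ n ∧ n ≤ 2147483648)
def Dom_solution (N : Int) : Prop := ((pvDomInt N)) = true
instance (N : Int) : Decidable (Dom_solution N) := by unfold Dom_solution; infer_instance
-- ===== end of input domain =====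

-- B replaces A's unit-step scan by a stride-9 scan over the only residue class mod 9
-- that can carry the target digit sum, with an arithmetic digit sum instead of A's
-- string round-trip (objective: alternative/constant-factor; equal return values on Pre_).

-- ===== PORT A =====
-- sum(map(int, str(num)))  (int of a non-digit char would raise; such chars occur only for num < 0, outside Pre_)
def pyDigitSum (num : Int) : Int :=
  (((PySem.Int.toStr num).toList).map (fun c => (PySem.Int.ofChars? [c]).getD 0)).sum

-- 'while True: … next_number += 1' — fuel is a termination guard only, 0 when it runs out
def searchA (target : Int) (n : Int) : Nat → Int
  | 0 => 0
  | f + 1 => if pyDigitSum n = target then n else searchA target (n + 1) f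

def solution (N : Int) : Int :=
  searchA (2 * pyDigitSum N) (N + 1) 9000000000000000

-- ===== PORT B =====
-- s = 0; while num > 0: s += num % 10; num //= 10
def digitSumLoop (num s : Int) : Int :=
  if 0 < num then digitSumLoop (PySem.Int.floordiv num 10) (s + PySem.Int.mod num 10) else s
termination_by num.toNat
decreasing_by
  rename_i h
  rw [PySem.Int.floordiv_eq_ediv_of_pos (by norm_num)]
  omega

-- 'while digit_sum(m) != target: m += 9' — fuel is a termination guard only, 0 when it runs out
def searchB (target : Int) (m : Int) : Nat → Int
  | 0 => 0
  | f + 1 => if digitSumLoop m 0 ≠ target then searchB target (m + 9) f else m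

def solution_alt (N : Int) : Int :=
  let target := 2 * digitSumLoop N 0
  searchB target (N + 1 + PySem.Int.mod (target - N - 1) 9) 1000000000000000

-- ===== PRECONDITION & SPEC =====
-- Pre_ excludes N < 0, where A raises ValueError (int('-')), and N = 0, where A never
-- returns (no number > 0 has digit sum 0); A returns normally on every N ≥ 1.
def Pre_solution (N : Int) : Prop := 1 ≤ N
instance (N : Int) : Decidable (Pre_solution N) := by unfold Pre_solution; infer_instance
def pvWitness_solution : Int := (5)

def Spec_solution (N : Int) (out : Int) : Prop := out = solution_alt N
instance (N : Int) (out : Int) : Decidable (Spec_solution N out) := by unfold Spec_solution; infer_instance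

-- ===== CLAIM (what is proved, stated in full; the proofs are below) =====
def Claim_equal_solution : Prop := ∀ (N : Int), Dom_solution N → Pre_solution N → Spec_solution N (solution N)

-- ===== LEMMAS AND PROOFS =====

-- the character of a decimal digit reads back as that digit
lemma ofChars_digitChar (d : Nat) (hd : d < 10) :
    (PySem.Int.ofChars? [Nat.digitChar d]).getD 0 = (d : Int) := by
  interval_cases d <;> decide

-- A's string digit sum is the decimal digit sum
lemma pyDigitSum_natCast (n : Nat) : pyDigitSum (n : Int) = ((Nat.digits 10 n).sum : Int) := by
  induction n using Nat.strong_induction_on with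
  | _ n ih =>
    unfold pyDigitSum
    rw [PySem.Int.toList_toStr]
    simp only [PySem.Int.toChars]
    rw [if_neg (by omega), Int.toNat_natCast]
    by_cases h : n < 10
    · rw [Nat.toDigits_of_lt_base h]
      rcases Nat.eq_zero_or_pos n with h0 | h0
      · subst h0; decide
      · rw [Nat.digits_def' (by norm_num : 1 < 10) h0]
        simp [ofChars_digitChar n h, Nat.div_eq_of_lt h, Nat.mod_eq_of_lt h]
    · rw [Nat.toDigits_of_base_le (by norm_num) (le_of_not_gt h)]
      rw [Nat.digits_def' (by norm_num : 1 < 10) (by omega)]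
      have h10 : n / 10 < n := Nat.div_lt_self (by omega) (by norm_num)
      have := ih (n / 10) h10
      unfold pyDigitSum at this
      rw [PySem.Int.toList_toStr] at this
      simp only [PySem.Int.toChars] at this
      rw [if_neg (by omega), Int.toNat_natCast] at this
      simp [this, ofChars_digitChar (n % 10) (Nat.mod_lt _ (by norm_num))]
      ring

-- B's arithmetic digit-sum loop computes the decimal digit sum
lemma digitSumLoop_natCast (n : Nat) : ∀ s : Int,
    digitSumLoop (n : Int) s = s + ((Nat.digits 10 n).sum : Int) := by
  induction n using Nat.strong_induction_on with
  | _ n ih =>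
    intro s
    rcases Nat.eq_zero_or_pos n with h0 | h0
    · subst h0; rw [digitSumLoop]; simp
    · rw [digitSumLoop, if_pos (by exact_mod_cast h0)]
      rw [PySem.Int.floordiv_eq_ediv_of_pos (by norm_num),
          PySem.Int.mod_eq_emod_of_pos (by norm_num)]
      have hdiv : (n : Int) / 10 = ((n / 10 : Nat) : Int) := by omega
      have hmod : (n : Int) % 10 = ((n % 10 : Nat) : Int) := by omega
      rw [hdiv, hmod, ih (n / 10) (Nat.div_lt_self h0 (by norm_num)),
          Nat.digits_def' (by norm_num : 1 < 10) h0]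
      simp [List.sum_cons]
      ring

-- the two digit sums agree on nonnegative inputs
lemma bridge (m : Int) (hm : 0 ≤ m) : digitSumLoop m 0 = pyDigitSum m := by
  obtain ⟨n, rfl⟩ := Int.eq_ofNat_of_zero_le hm
  rw [digitSumLoop_natCast, pyDigitSum_natCast]
  simp

-- digit sum is congruent to the number mod 9
lemma mod9_of_digitSum (m S : Int) (hm : 0 ≤ m) (h : pyDigitSum m = S) :
    PySem.Int.mod (S - m) 9 = 0 := by
  obtain ⟨n, rfl⟩ := Int.eq_ofNat_of_zero_le hm
  rw [pyDigitSum_natCast] at h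
  rw [PySem.Int.mod_eq_zero_iff_dvd]
  subst h
  exact_mod_cast (Nat.modEq_digits_sum 9 10 (by norm_num) n).dvd

lemma ne_of_misaligned (m S : Int) (hm : 0 ≤ m) (h : PySem.Int.mod (S - m) 9 ≠ 0) :
    pyDigitSum m ≠ S := fun hds => h (mod9_of_digitSum m S hm hds)

lemma searchA_succ (S n : Int) (f : Nat) :
    searchA S n (f + 1) = if pyDigitSum n = S then n else searchA S (n + 1) f := rfl

lemma searchB_succ (S m : Int) (f : Nat) :
    searchB S m (f + 1) = if digitSumLoop m 0 ≠ S then searchB S (m + 9) f else m := rfl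

-- skipping k consecutive non-hits
lemma skipMany (k : Nat) : ∀ (S n : Int) (f : Nat),
    (∀ j : Nat, j < k → pyDigitSum (n + (j : Int)) ≠ S) →
    searchA S n (f + k) = searchA S (n + (k : Int)) f := by
  induction k with
  | zero => intro S n f _; simp
  | succ k ih =>
    intro S n f h
    have h0 : pyDigitSum n ≠ S := by simpa using h 0 (by omega)
    have : f + (k + 1) = (f + k) + 1 := by omega
    rw [this, searchA_succ, if_neg h0, ih S (n + 1) f]
    · congr 1; push_cast; ring
    · intro j hj
      have := h (j + 1) (by omega)
      push_cast at this ⊢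
      convert this using 2
      ring

-- the stride-9 scan from the aligned start point agrees with the unit-step scan
lemma scan_agree (F : Nat) : ∀ (n S : Int), 0 ≤ n →
    searchA S n (9 * F) = searchB S (n + PySem.Int.mod (S - n) 9) F := by
  induction F with
  | zero => intro n S _; rfl
  | succ F ih =>
    intro n S hn
    set r : Int := PySem.Int.mod (S - n) 9 with hr
    have hr0 : 0 ≤ r := PySem.Int.mod_nonneg _ (by norm_num)
    have hr9 : r < 9 := PySem.Int.mod_lt _ (by norm_num)
    have hdvd : (9 : Int) ∣ (S - n - r) := by
      have := PySem.Int.floordiv_mul_add_mod (S - n) 9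
      exact ⟨PySem.Int.floordiv (S - n) 9, by omega⟩
    -- skip the r misaligned points n, n+1, …, n+r-1
    have hskip1 : ∀ j : Nat, (j : Int) < r → pyDigitSum (n + (j : Int)) ≠ S := by
      intro j hj
      apply ne_of_misaligned _ _ (by omega)
      intro hmod0
      rw [PySem.Int.mod_eq_zero_iff_dvd] at hmod0
      obtain ⟨c, hc⟩ := hmod0
      obtain ⟨d, hd⟩ := hdvd
      omega
    have h1 : 9 * (F + 1) = (9 * F + (9 - r.toNat)) + r.toNat := by omega
    rw [h1, skipMany r.toNat S n _ (by intro j hj; exact hskip1 j (by omega)),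
        show n + (r.toNat : Int) = n + r by rw [Int.toNat_of_nonneg hr0]]
    -- head check at the aligned point n + r
    have h2 : 9 * F + (9 - r.toNat) = (9 * F + (8 - r.toNat)) + 1 := by omega
    rw [h2, searchA_succ, searchB_succ,
        bridge (n + r) (by omega)]
    by_cases hhit : pyDigitSum (n + r) = S
    · rw [if_pos hhit, if_neg (by simp [hhit])]
    · rw [if_neg hhit, if_pos (by simpa using hhit)]
      -- skip the 8 - r misaligned points n+r+1, …, n+8
      have hskip2 : ∀ j : Nat, j < 8 - r.toNat → pyDigitSum (n + r + 1 + (j : Int)) ≠ S := by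
        intro j hj
        apply ne_of_misaligned _ _ (by omega)
        intro hmod0
        rw [PySem.Int.mod_eq_zero_iff_dvd] at hmod0
        obtain ⟨c, hc⟩ := hmod0
        obtain ⟨d, hd⟩ := hdvd
        omega
      rw [skipMany (8 - r.toNat) S (n + r + 1) (9 * F) hskip2]
      have h3 : n + r + 1 + ((8 - r.toNat : Nat) : Int) = (n + 9) := by
        omega
      rw [h3, ih (n + 9) S (by omega)]
      -- mod (S - (n+9)) 9 = r, so the two start points coincide
      have hmodeq : PySem.Int.mod (S - (n + 9)) 9 = PySem.Int.mod (S - n) 9 := by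
        rw [PySem.Int.mod_eq_emod_of_pos (by norm_num),
            PySem.Int.mod_eq_emod_of_pos (by norm_num)]
        have h4 : S - (n + 9) = (S - n) + (-1) * 9 := by ring
        rw [h4, Int.add_mul_emod_self_right]
      have harg : n + 9 + PySem.Int.mod (S - (n + 9)) 9 = n + r + 9 := by
        rw [hmodeq]; omega
      rw [harg]

-- ===== VERDICT (by name: the statement is the Claim_ definition above) =====
theorem solution_spec : Claim_equal_solution := by
  intro N _ hN
  have hN1 : (1 : Int) ≤ N := hN
  unfold Spec_solution solution solution_alt
  rw [bridge N (by omega)]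
  have h := scan_agree 1000000000000000 (N + 1) (2 * pyDigitSum N) (by omega)
  rw [show (9 * 1000000000000000 : Nat) = 9000000000000000 by norm_num] at h
  rw [h, show 2 * pyDigitSum N - (N + 1) = 2 * pyDigitSum N - N - 1 from by ring]
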